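-- pv_equiv track=rewrite | github.com/GeeN33/ExchangeInformation | service/predicted.py | add_delta
-- ===== SOURCE A (Python) =====
-- def add_delta(bars):
--     deltas = []
--     delta = 1000
--     for bar in bars:
--         deltas.append(delta)
--         delta = delta + bar['delta_buy'] - bar['delta_sell']
--         deltas.append(delta)
--     return deltas
-- ===== SOURCE B (Python) =====
-- def add_delta(bars):
--     # Phase 1: prefix-sum of per-bar differences -> n+1 boundary checkpoints.
--     cps = [1000]
--     for bar in bars:
--         cps.append(cps[-1] + bar['delta_buy'] - bar['delta_sell'])
--     # Phase 2: interleave adjacent checkpoints (earlier, later) per bar.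
--     return [v for pair in zip(cps, cps[1:]) for v in pair]
-- ===== Notes on version B (the rewrite author's own statement) =====
-- stated objective: alternative
-- what changed: Splits A's single fused loop into two phases: a prefix-sum pass building the n+1 boundary checkpoints, then a zip-based interleaving pass emitting each adjacent checkpoint pair; Pre_ excludes bars missing 'delta_buy'/'delta_sell', where both raise KeyError.
import Mathlib
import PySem

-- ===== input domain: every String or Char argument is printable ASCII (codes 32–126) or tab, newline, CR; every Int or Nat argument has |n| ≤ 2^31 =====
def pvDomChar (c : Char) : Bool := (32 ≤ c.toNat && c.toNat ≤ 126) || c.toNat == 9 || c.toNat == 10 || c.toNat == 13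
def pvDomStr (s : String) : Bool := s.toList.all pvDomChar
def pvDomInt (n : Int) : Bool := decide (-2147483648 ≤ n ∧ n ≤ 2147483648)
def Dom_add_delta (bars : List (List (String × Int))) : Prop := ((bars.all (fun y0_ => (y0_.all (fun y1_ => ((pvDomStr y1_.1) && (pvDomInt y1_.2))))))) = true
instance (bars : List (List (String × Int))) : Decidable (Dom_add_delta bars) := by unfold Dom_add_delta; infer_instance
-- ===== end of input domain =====

-- B replaces A's fused loop by a prefix-sum phase over checkpoints followed by a zip-interleaving phase (alternative decomposition, same cost).

-- ===== PORT A =====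
-- one fused loop: append delta, update it, append again (dict lookups default 0 only outside Pre_)
def add_delta (bars : List (List (String × Int))) : List Int :=
  (bars.foldl (fun (st : List Int × Int) bar =>
      let deltas := st.1 ++ [st.2]
      let delta := st.2 + PySem.Dict.getD (PySem.Dict.mk bar) "delta_buy" 0 - PySem.Dict.getD (PySem.Dict.mk bar) "delta_sell" 0
      (deltas ++ [delta], delta)) ([], 1000)).1

-- ===== PORT B =====
-- phase 1: checkpoints by prefix sum (cps[-1] via pyGetD; cps is never empty)
def addDeltaCps (bars : List (List (String × Int))) : List Int :=
  bars.foldl (fun cps bar =>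
      cps ++ [PySem.List.pyGetD cps (-1) 0 + PySem.Dict.getD (PySem.Dict.mk bar) "delta_buy" 0 - PySem.Dict.getD (PySem.Dict.mk bar) "delta_sell" 0])
    [1000]

-- phase 2: interleave adjacent checkpoint pairs
def add_delta_alt (bars : List (List (String × Int))) : List Int :=
  let cps := addDeltaCps bars
  (cps.zip (cps.drop 1)).flatMap (fun p => [p.1, p.2])

-- ===== PRECONDITION & SPEC =====
-- Pre_ excludes exactly the inputs where Python A raises KeyError: a bar lacking either key.
def Pre_add_delta (bars : List (List (String × Int))) : Prop :=
  ∀ bar ∈ bars, (PySem.Dict.get? (PySem.Dict.mk bar) "delta_buy").isSome ∧ (PySem.Dict.get? (PySem.Dict.mk bar) "delta_sell").isSome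
instance (bars : List (List (String × Int))) : Decidable (Pre_add_delta bars) := by unfold Pre_add_delta; infer_instance
def pvWitness_add_delta : (List (List (String × Int))) :=
  [[("delta_buy", 5), ("delta_sell", 2)], [("delta_buy", 0), ("delta_sell", 7)]]
def Spec_add_delta (bars : List (List (String × Int))) (out : List Int) : Prop := out = add_delta_alt bars
instance (bars : List (List (String × Int))) (out : List Int) : Decidable (Spec_add_delta bars out) := by unfold Spec_add_delta; infer_instance

-- ===== CLAIM (what is proved, stated in full; the proofs are below) =====
def Claim_equal_add_delta : Prop := ∀ (bars : List (List (String × Int))), Dom_add_delta bars → Pre_add_delta bars → Spec_add_delta bars (add_delta bars)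

-- ===== LEMMAS AND PROOFS =====

-- the shared mathematical shape: [d, d1, d1, d2, ...] starting from delta d
def pvRun (d : Int) : List (List (String × Int)) → List Int
  | [] => []
  | bar :: bs =>
      let d' := d + PySem.Dict.getD (PySem.Dict.mk bar) "delta_buy" 0 - PySem.Dict.getD (PySem.Dict.mk bar) "delta_sell" 0
      d :: d' :: pvRun d' bs

-- just the successive checkpoints after d
def pvCk (d : Int) : List (List (String × Int)) → List Int
  | [] => []
  | bar :: bs =>
      let d' := d + PySem.Dict.getD (PySem.Dict.mk bar) "delta_buy" 0 - PySem.Dict.getD (PySem.Dict.mk bar) "delta_sell" 0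
      d' :: pvCk d' bs

theorem foldA_run (bars : List (List (String × Int))) :
    ∀ (acc : List Int) (d : Int),
      (bars.foldl (fun (st : List Int × Int) bar =>
        let deltas := st.1 ++ [st.2]
        let delta := st.2 + PySem.Dict.getD (PySem.Dict.mk bar) "delta_buy" 0 - PySem.Dict.getD (PySem.Dict.mk bar) "delta_sell" 0
        (deltas ++ [delta], delta)) (acc, d)).1 = acc ++ pvRun d bars := by
  induction bars with
  | nil => intro acc d; simp [pvRun]
  | cons bar bs ih =>
      intro acc d
      simp only [List.foldl_cons, pvRun]
      rw [ih]
      simp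

theorem foldB_ck (bars : List (List (String × Int))) :
    ∀ (cs : List Int) (x : Int),
      bars.foldl (fun cps bar =>
        cps ++ [PySem.List.pyGetD cps (-1) 0 + PySem.Dict.getD (PySem.Dict.mk bar) "delta_buy" 0 - PySem.Dict.getD (PySem.Dict.mk bar) "delta_sell" 0]) (cs ++ [x])
      = (cs ++ [x]) ++ pvCk x bars := by
  induction bars with
  | nil => intro cs x; simp [pvCk]
  | cons bar bs ih =>
      intro cs x
      simp only [List.foldl_cons]
      rw [PySem.List.pyGetD_neg_one_append_singleton]
      have h := ih (cs ++ [x]) (x + PySem.Dict.getD (PySem.Dict.mk bar) "delta_buy" 0 - PySem.Dict.getD (PySem.Dict.mk bar) "delta_sell" 0)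
      simp only [List.append_assoc] at h ⊢
      rw [h]
      simp [pvCk]

theorem zip_ck_run (bars : List (List (String × Int))) :
    ∀ (d : Int),
      ((d :: pvCk d bars).zip (pvCk d bars)).flatMap (fun p => [p.1, p.2]) = pvRun d bars := by
  induction bars with
  | nil => intro d; simp [pvCk, pvRun]
  | cons bar bs ih =>
      intro d
      simp only [pvCk, pvRun]
      rw [List.zip_cons_cons, List.flatMap_cons, ih]
      rfl

-- ===== VERDICT (by name: the statement is the Claim_ definition above) =====
theorem add_delta_spec : Claim_equal_add_delta := by
  intro bars _ _
  unfold Spec_add_delta add_delta add_delta_alt addDeltaCps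
  rw [foldA_run bars [] 1000]
  have h := foldB_ck bars [] 1000
  simp only [List.nil_append] at h ⊢
  rw [h]
  exact (zip_ck_run bars 1000).symm
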